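-- pv_equiv track=rewrite | github.com/pypi-data/pypi-mirror-15 | packages/dbase32/dbase32-1.7.0.tar.gz/dbase32-1.7.0/dbase32/tests/__init__.py | string_iter
-- ===== SOURCE A (Python) =====
-- def string_iter(index, count, a, b, c):
--     assert 0 <= index < count
--     for i in range(count):
--         if i < index:
--             yield a
--         elif i == index:
--             yield b
--         else:
--             yield c
-- ===== SOURCE B (Python) =====
-- def string_iter(index, count, a, b, c):
--     assert 0 <= index < count
--     yield from [a] * index + [b] + [c] * (count - index - 1)
-- ===== Notes on version B (the rewrite author's own statement) =====
-- stated objective: simpler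
-- what changed: Replaces the per-element i<index / i==index / else branch inside a range loop by emitting three precomputed runs: index copies of a, then b, then count-index-1 copies of c.
import Mathlib
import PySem

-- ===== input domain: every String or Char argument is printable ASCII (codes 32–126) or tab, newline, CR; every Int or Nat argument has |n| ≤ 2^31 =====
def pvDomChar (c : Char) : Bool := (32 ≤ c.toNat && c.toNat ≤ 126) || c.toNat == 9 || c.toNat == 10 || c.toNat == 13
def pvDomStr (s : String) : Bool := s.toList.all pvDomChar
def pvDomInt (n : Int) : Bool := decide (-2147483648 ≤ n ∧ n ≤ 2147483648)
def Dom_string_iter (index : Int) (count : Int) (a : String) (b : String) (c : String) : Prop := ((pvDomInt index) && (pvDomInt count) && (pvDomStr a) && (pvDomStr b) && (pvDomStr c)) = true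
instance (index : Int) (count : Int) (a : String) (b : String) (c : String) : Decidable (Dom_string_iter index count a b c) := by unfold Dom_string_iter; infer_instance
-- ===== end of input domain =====

-- B emits three precomputed runs (a*index, b, c*(count-index-1)) instead of branching on i per element; objective: simpler.
-- ===== PORT A =====
def string_iter (index : Int) (count : Int) (a : String) (b : String) (c : String) : List String :=
  (PySem.List.pyRange 0 count 1).foldl (fun acc i =>
    if i < index then acc ++ [a]
    else if i == index then acc ++ [b]
    else acc ++ [c]) []

-- ===== PORT B =====
def string_iter_alt (index : Int) (count : Int) (a : String) (b : String) (c : String) : List String :=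
  List.replicate index.toNat a ++ [b] ++ List.replicate (count - index - 1).toNat c

-- ===== PRECONDITION & SPEC =====
-- Pre_ excludes exactly the inputs where A's assert fails (AssertionError).
def Pre_string_iter (index : Int) (count : Int) (a : String) (b : String) (c : String) : Prop :=
  0 ≤ index ∧ index < count
instance (index : Int) (count : Int) (a : String) (b : String) (c : String) : Decidable (Pre_string_iter index count a b c) := by unfold Pre_string_iter; infer_instance
def pvWitness_string_iter : Int × Int × String × String × String := (1, 3, "a", "b", "c")

def Spec_string_iter (index : Int) (count : Int) (a : String) (b : String) (c : String) (out : List String) : Prop := out = string_iter_alt index count a b c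
instance (index : Int) (count : Int) (a : String) (b : String) (c : String) (out : List String) : Decidable (Spec_string_iter index count a b c out) := by unfold Spec_string_iter; infer_instance

-- ===== CLAIM (what is proved, stated in full; the proofs are below) =====
def Claim_equal_string_iter : Prop := ∀ (index : Int) (count : Int) (a : String) (b : String) (c : String), Dom_string_iter index count a b c → Pre_string_iter index count a b c → Spec_string_iter index count a b c (string_iter index count a b c)

-- ===== LEMMAS AND PROOFS =====

-- the loop body, named for the proofs
def pvBody (index : Int) (a b c : String) : List String → Int → List String :=
  fun acc i => if i < index then acc ++ [a] else if i == index then acc ++ [b] else acc ++ [c]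

-- while the counter stays ≤ index, the loop only appends copies of a
theorem pv_fold_all_a (index : Int) (a b c : String) (n : Nat) (acc : List String)
    (h : (n : Int) ≤ index) :
    (PySem.List.pyRange 0 n 1).foldl (pvBody index a b c) acc = acc ++ List.replicate n a := by
  induction n generalizing acc with
  | zero => simp
  | succ m ih =>
      have hm : (m : Int) ≤ index := by push_cast at h ⊢; omega
      have hsplit : PySem.List.pyRange 0 ((m : Int) + 1) 1
          = PySem.List.pyRange 0 (m : Int) 1 ++ [(m : Int)] :=
        PySem.List.pyRange_one_succ_right (by positivity)
      rw [show ((Nat.succ m : Nat) : Int) = ((m : Int) + 1) by push_cast; ring, hsplit,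
        List.foldl_append, ih _ hm]
      have hlt : (m : Int) < index := by push_cast at h; omega
      simp [pvBody, hlt, List.replicate_succ']

-- once 0 ≤ index < n, the fold produces the three runs
theorem pv_fold_runs (index : Int) (a b c : String) (n : Nat) (acc : List String)
    (h0 : 0 ≤ index) (h1 : index < (n : Int)) :
    (PySem.List.pyRange 0 n 1).foldl (pvBody index a b c) acc
      = acc ++ List.replicate index.toNat a ++ [b] ++ List.replicate (n - index.toNat - 1) c := by
  induction n generalizing acc with
  | zero => exact absurd h1 (by push_cast; omega)
  | succ m ih =>
      have hsplit : PySem.List.pyRange 0 ((m : Int) + 1) 1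
          = PySem.List.pyRange 0 (m : Int) 1 ++ [(m : Int)] :=
        PySem.List.pyRange_one_succ_right (by positivity)
      rw [show ((Nat.succ m : Nat) : Int) = ((m : Int) + 1) by push_cast; ring, hsplit,
        List.foldl_append]
      by_cases hc : index < (m : Int)
      · rw [ih acc hc]
        have hnlt : ¬ (m : Int) < index := by omega
        have hne : ¬ ((m : Int) == index) = true := by simp; omega
        have : m + 1 - index.toNat - 1 = (m - index.toNat - 1) + 1 := by omega
        simp [pvBody, hnlt, hne, this, List.replicate_succ']
      · have heq : index = (m : Int) := by push_cast at h1; omega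
        have hma : (m : Int) ≤ index := by omega
        rw [pv_fold_all_a index a b c m acc hma]
        have : index.toNat = m := by omega
        simp [pvBody, heq]


-- ===== VERDICT (by name: the statement is the Claim_ definition above) =====
theorem string_iter_spec : Claim_equal_string_iter := by
  intro index count a b c _ hpre
  obtain ⟨h0, h1⟩ := hpre
  unfold Spec_string_iter string_iter string_iter_alt
  have hcount : count = (count.toNat : Int) := by omega
  have h1' : index < (count.toNat : Int) := by omega
  rw [show (fun (acc : List String) (i : Int) => if i < index then acc ++ [a] else if i == index then acc ++ [b] else acc ++ [c]) = pvBody index a b c from rfl,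
    hcount, pv_fold_runs index a b c count.toNat [] h0 h1']
  have : count.toNat - index.toNat - 1 = (count - index - 1).toNat := by omega
  rw [this]; simp
  congr 2
  omega
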